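-- pv_equiv track=rewrite | github.com/pypi-data/pypi-mirror-359 | packages/grana/grana-1.4.0a9.tar.gz/grana-1.4.0a9/src/grana/display/utils.py | locate_parent_name_by_prefix
-- ===== SOURCE A (Python) =====
-- import itertools
-- import typing as t
--
-- def get_common_prefix(*strings: str) -> str:
--     """Calculate the longest common prefix of a sequence of strings"""
--     character_tuples: t.Iterable[t.Tuple[str, ...]] = zip(*strings)
--     common_prefix_iterator = itertools.takewhile(lambda chars: all(chars[0] == c for c in chars), character_tuples)
--     return "".join(common_chars[0] for common_chars in common_prefix_iterator)
--
-- def locate_parent_name_by_prefix(children: t.Iterable[str], candidates: t.Iterable[str]) -> str: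
--     """Define the optimal parent among candidates for the children"""
--     longest_match_length: int = -1
--     sources_common_prefix: str = get_common_prefix(*children)
--     optimal_item_name: str = ""
--     for candidate in candidates:
--         match_length = len(get_common_prefix(candidate, sources_common_prefix))
--         if match_length > longest_match_length:
--             longest_match_length = match_length
--             optimal_item_name = candidate
--         elif match_length == longest_match_length and len(optimal_item_name) > len(candidate):
--             optimal_item_name = candidate
--     return optimal_item_name
-- ===== SOURCE B (Python) =====
-- import itertools
-- import typing as t
--
-- def get_common_prefix(*strings: str) -> str:
--     """Calculate the longest common prefix of a sequence of strings"""
--     character_tuples: t.Iterable[t.Tuple[str, ...]] = zip(*strings)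
--     common_prefix_iterator = itertools.takewhile(lambda chars: all(chars[0] == c for c in chars), character_tuples)
--     return "".join(common_chars[0] for common_chars in common_prefix_iterator)
--
-- def locate_parent_name_by_prefix(children: t.Iterable[str], candidates: t.Iterable[str]) -> str:
--     """Define the optimal parent among candidates for the children"""
--     sources_common_prefix = get_common_prefix(*children)
--     ranked = sorted(
--         candidates,
--         key=lambda candidate: (-len(get_common_prefix(candidate, sources_common_prefix)), len(candidate)),
--     )
--     return ranked[0] if ranked else ""
-- ===== Notes on version B (the rewrite author's own statement) =====
-- stated objective: alternative
-- what changed: Replaced the streaming best-so-far accumulator loop (tracking longest_match_length and optimal_item_name with a two-branch update) by a stable sort of all candidates under the compound key (-match_length, len(candidate)) followed by taking the first element, with '' for an empty candidate list.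
import Mathlib
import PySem

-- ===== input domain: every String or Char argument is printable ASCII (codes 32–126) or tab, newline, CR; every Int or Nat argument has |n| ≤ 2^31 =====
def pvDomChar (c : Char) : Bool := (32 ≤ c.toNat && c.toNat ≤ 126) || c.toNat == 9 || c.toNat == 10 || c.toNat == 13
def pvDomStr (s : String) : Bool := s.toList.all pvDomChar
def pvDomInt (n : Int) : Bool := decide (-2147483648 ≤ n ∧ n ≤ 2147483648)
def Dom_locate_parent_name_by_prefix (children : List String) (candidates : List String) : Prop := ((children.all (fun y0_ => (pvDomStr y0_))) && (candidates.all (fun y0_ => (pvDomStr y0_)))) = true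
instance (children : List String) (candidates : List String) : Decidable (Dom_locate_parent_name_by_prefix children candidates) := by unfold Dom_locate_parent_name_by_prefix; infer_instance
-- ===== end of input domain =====

-- B replaces A's streaming best-so-far accumulator loop by a stable sort of the candidates
-- under the compound key (-match_length, len(candidate)) followed by taking the first element
-- (an alternative decomposition, not claimed faster).


-- ===== PORT A =====
-- zip(*strings): columns up to the minimum length (exact: i < min of the lengths, so getD never defaults)
def pvZipCols (css : List (List Char)) : List (List Char) :=
  match css with
  | [] => []
  | c :: cs =>
    (List.range (cs.foldl (fun m s => min m s.length) c.length)).map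
      (fun i => (c :: cs).map (fun s => s.getD i ' '))

-- get_common_prefix(*strings): takewhile(all chars equal chars[0]) over the zipped columns, joined
def pvGcp (strings : List String) : String :=
  String.ofList
    (((pvZipCols (strings.map String.toList)).takeWhile
        (fun col => col.all (fun ch => col.headD ' ' == ch))).map (fun col => col.headD ' '))

def locate_parent_name_by_prefix (children : List String) (candidates : List String) : String :=
  let sources_common_prefix := pvGcp children
  (candidates.foldl
    (fun (st : Int × String) candidate =>
      let match_length : Int := ((pvGcp [candidate, sources_common_prefix]).toList.length : Int)
      if match_length > st.1 then (match_length, candidate)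
      else if match_length = st.1 ∧ st.2.toList.length > candidate.toList.length then (st.1, candidate)
      else st)
    (-1, "")).2

-- ===== PORT B =====
def locate_parent_name_by_prefix_alt (children : List String) (candidates : List String) : String :=
  let sources_common_prefix := pvGcp children
  let ranked := PySem.List.sorted2 candidates
    (fun candidate => -((pvGcp [candidate, sources_common_prefix]).toList.length : Int))
    (fun candidate => (candidate.toList.length : Int))
  match ranked with
  | [] => ""
  | r :: _ => r

-- ===== PRECONDITION & SPEC =====
def Spec_locate_parent_name_by_prefix (children : List String) (candidates : List String) (out : String) : Prop := out = locate_parent_name_by_prefix_alt children candidates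
instance (children : List String) (candidates : List String) (out : String) : Decidable (Spec_locate_parent_name_by_prefix children candidates out) := by unfold Spec_locate_parent_name_by_prefix; infer_instance

-- ===== CLAIM (what is proved, stated in full; the proofs are below) =====
def Claim_equal_locate_parent_name_by_prefix : Prop := ∀ (children : List String) (candidates : List String), Dom_locate_parent_name_by_prefix children candidates → Spec_locate_parent_name_by_prefix children candidates (locate_parent_name_by_prefix children candidates)

-- ===== LEMMAS AND PROOFS =====

-- the "before" relation of B's stable sort, specialised to key (-mlen, len)
def pvBefore (mlen : String → Int) (x m : String) : Bool :=
  decide (-(mlen x) < -(mlen m)) || !decide (-(mlen m) < -(mlen x)) && decide ((x.toList.length : Int) < (m.toList.length : Int))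

-- the first pvBefore-minimal element, scanned left to right from opt
def pvSel (mlen : String → Int) (opt : String) (xs : List String) : String :=
  xs.foldl (fun m x => if pvBefore mlen x m then x else m) opt

theorem pvBefore_iff (mlen : String → Int) (x m : String) :
    pvBefore mlen x m = true ↔
      (mlen m < mlen x ∨ (mlen x = mlen m ∧ (x.toList.length : Int) < (m.toList.length : Int))) := by
  simp only [pvBefore, Bool.or_eq_true, Bool.and_eq_true, Bool.not_eq_true',
    decide_eq_true_eq, decide_eq_false_iff_not]
  omega

theorem pvHead_insertBy {α : Type} (b : α → α → Bool) (x : α) (ys : List α) :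
    (PySem.List.insertBy b x ys).head? =
      some (match ys with | [] => x | y :: _ => if b x y then x else y) := by
  cases ys with
  | nil => rfl
  | cons y ys => simp only [PySem.List.insertBy]; split <;> rfl

theorem pvHead_foldl_insertBy {α : Type} (b : α → α → Bool) (xs : List α) (acc : List α) :
    (xs.foldl (fun a x => PySem.List.insertBy b x a) acc).head? =
      xs.foldl (fun o x => match o with
        | none => some x
        | some m => if b x m then some x else some m) acc.head? := by
  induction xs generalizing acc with
  | nil => rfl
  | cons x xs ih =>
    simp only [List.foldl_cons]
    rw [ih]
    congr 1
    rw [pvHead_insertBy]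
    cases acc with
    | nil => rfl
    | cons a t => by_cases h : b x a = true <;> simp [h]

theorem pvFoldg_some (mlen : String → Int) (xs : List String) (opt : String) :
    xs.foldl (fun o x => match o with
        | none => some x
        | some m => if pvBefore mlen x m then some x else some m) (some opt)
      = some (pvSel mlen opt xs) := by
  induction xs generalizing opt with
  | nil => rfl
  | cons x xs ih =>
    simp only [List.foldl_cons, pvSel]
    by_cases h : pvBefore mlen x opt = true <;> simp [h, ih, pvSel]

-- A's two-branch update coincides with selection by pvBefore, given the invariant st.1 = mlen st.2
theorem pvStep_eq (mlen : String → Int) (opt x : String) :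
    (if ((mlen x : Int) > mlen opt) then (mlen x, x)
     else if (mlen x = mlen opt ∧ opt.toList.length > x.toList.length) then (mlen opt, x)
     else (mlen opt, opt))
    = (mlen (if pvBefore mlen x opt then x else opt), (if pvBefore mlen x opt then x else opt)) := by
  cases htrue : pvBefore mlen x opt with
  | true =>
    simp only [if_true]
    rcases (pvBefore_iff mlen x opt).mp htrue with hgt | ⟨heq, hlt⟩
    · rw [if_pos hgt]
    · have hlen : x.toList.length < opt.toList.length := by exact_mod_cast hlt
      rw [if_neg (by omega), if_pos ⟨heq, hlen⟩, heq]
  | false =>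
    simp only [Bool.false_eq_true, if_false]
    have hnot := (pvBefore_iff mlen x opt).not.mp (by simp [htrue])
    rw [not_or, not_and_or] at hnot
    rw [if_neg (by omega)]
    rw [if_neg]
    rintro ⟨heq, hlen⟩
    have : (x.toList.length : Int) < (opt.toList.length : Int) := by exact_mod_cast hlen
    rcases hnot.2 with h2 | h2 <;> omega

-- A's fold, started on a coherent state, computes the pvBefore-selection
theorem pvFoldA_eq (mlen : String → Int) (xs : List String) (opt : String) :
    xs.foldl
      (fun (st : Int × String) x =>
        if ((mlen x : Int) > st.1) then (mlen x, x)
        else if (mlen x = st.1 ∧ st.2.toList.length > x.toList.length) then (st.1, x)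
        else st)
      (mlen opt, opt)
    = (mlen (pvSel mlen opt xs), pvSel mlen opt xs) := by
  induction xs generalizing opt with
  | nil => rfl
  | cons x xs ih =>
    simp only [List.foldl_cons]
    rw [pvStep_eq mlen opt x, ih]
    simp [pvSel]

-- the accumulator selection against the stably sorted list, for any nonneg score
theorem pvMain (mlen : String → Int) (hnn : ∀ s, 0 ≤ mlen s) (candidates : List String) :
    (candidates.foldl
      (fun (st : Int × String) candidate =>
        if ((mlen candidate : Int) > st.1) then (mlen candidate, candidate)
        else if (mlen candidate = st.1 ∧ st.2.toList.length > candidate.toList.length) then (st.1, candidate)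
        else st)
      (-1, "")).2
    = (match PySem.List.sorted2 candidates (fun candidate => -(mlen candidate))
          (fun candidate => (candidate.toList.length : Int)) with
       | [] => ""
       | r :: _ => r) := by
  cases candidates with
  | nil => rfl
  | cons c cs =>
    have hB : (PySem.List.sorted2 (c :: cs) (fun candidate => -(mlen candidate))
        (fun candidate => (candidate.toList.length : Int))).head? = some (pvSel mlen c cs) := by
      dsimp only [PySem.List.sorted2]
      rw [pvHead_foldl_insertBy]
      simp only [List.head?_nil, List.foldl_cons, Bool.false_eq_true, if_false]
      have h := pvFoldg_some mlen cs c
      simp only [pvBefore] at h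
      convert h using 2
      funext o x
      cases o <;> rfl
    have hC : ∀ (l : List String), l.head? = some (pvSel mlen c cs) →
        (match l with | [] => "" | r :: _ => r) = pvSel mlen c cs := by
      intro l hl
      cases l with
      | nil => simp at hl
      | cons a t => simpa using hl
    rw [hC _ hB]
    simp only [List.foldl_cons]
    rw [if_pos (show mlen c > (-1 : Int) by have := hnn c; omega)]
    rw [pvFoldA_eq]

-- ===== VERDICT (by name: the statement is the Claim_ definition above) =====
theorem locate_parent_name_by_prefix_spec : Claim_equal_locate_parent_name_by_prefix := by
  intro children candidates _
  unfold Spec_locate_parent_name_by_prefix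
  unfold locate_parent_name_by_prefix locate_parent_name_by_prefix_alt
  exact pvMain (fun cand => ((pvGcp [cand, pvGcp children]).toList.length : Int))
    (fun s => Int.natCast_nonneg _) candidates
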